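-- pv_equiv track=rewrite | github.com/shvets/AudioBoo.bundle | Contents/Code/audioboo_service.py | merge_small_groups
-- ===== SOURCE A (Python) =====
-- from collections import OrderedDict
--
-- def merge_small_groups(groups):
--     # merge groups into bigger groups with size ~ 20 records
--
--     classifier = []
--
--     group_size = 0
--     classifier.append([])
--     index = 0
--
--     for group_name in groups:
--         group_weight = len(groups[group_name])
--         group_size += group_weight
--
--         if group_size > 20:
--             group_size = 0
--             classifier.append([])
--             index = index+1
--
--         classifier[index].append(group_name)
--
--     # flatten records from different group within same classification
--     # assign new name in format first_name-last_name, e.g. ABC-AZZ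
--
--     new_groups = OrderedDict()
--
--     for group_names in classifier:
--         key = group_names[0] + "-" + group_names[len(group_names)-1]
--         new_groups[key] = []
--
--         for group_name in group_names:
--             for item in groups[group_name]:
--                 new_groups[key].append(item)
--
--     return new_groups
-- ===== SOURCE B (Python) =====
-- from collections import OrderedDict
--
-- def merge_small_groups(groups):
--     # Single pass: build the merged OrderedDict directly, keeping the current
--     # bucket's first name, last name, accumulated items and running size.
--     new_groups = OrderedDict()
--     first = last = None
--     items = []
--     size = 0
--     for name in groups:
--         records = groups[name]
--         if first is not None and size + len(records) > 20:
--             new_groups[first + "-" + last] = items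
--             first, items, size = name, list(records), 0
--         else:
--             if first is None:
--                 first = name
--             items = items + records
--             size += len(records)
--         last = name
--     new_groups[first + "-" + last] = items
--     return new_groups
-- ===== Notes on version B (the rewrite author's own statement) =====
-- stated objective: simpler
-- what changed: A builds an intermediate classifier of name-buckets in one pass and then a second nested pass flattens each bucket by re-looking-up every group and appending item by item into the OrderedDict; B is a single fused pass that builds the merged OrderedDict directly, carrying the current bucket's first/last name, accumulated items and running size, inserting each finished bucket as one assignment.
-- outside the precondition, e.g. on merge_small_groups({}): A raises IndexError, B raises TypeError
import Mathlib
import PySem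

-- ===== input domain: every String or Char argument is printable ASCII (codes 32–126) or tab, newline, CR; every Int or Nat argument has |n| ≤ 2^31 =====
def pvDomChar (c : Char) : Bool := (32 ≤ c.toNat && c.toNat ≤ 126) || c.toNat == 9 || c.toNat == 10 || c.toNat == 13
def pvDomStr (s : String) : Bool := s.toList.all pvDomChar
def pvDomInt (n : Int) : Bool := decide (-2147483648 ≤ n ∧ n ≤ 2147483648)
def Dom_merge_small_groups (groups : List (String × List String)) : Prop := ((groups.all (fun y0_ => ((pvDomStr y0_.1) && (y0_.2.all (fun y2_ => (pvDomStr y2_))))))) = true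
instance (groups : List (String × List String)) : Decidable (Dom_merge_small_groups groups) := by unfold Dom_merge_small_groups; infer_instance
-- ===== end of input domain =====

-- B fuses A's two passes into one, building the merged OrderedDict directly
-- (objective: simpler — one pass, no intermediate classifier of name-buckets).

-- ===== PORT A =====
-- Phase 1 of A: classifier of name-buckets. Python keeps `classifier` and an
-- `index` that always points at the LAST bucket, so the state is rendered as
-- (finished buckets, current bucket, group_size); classifier = finished ++ [cur].
def mergeStepA (groups : List (String × List String))
    (st : List (List String) × List String × Int) (p : String × List String) :
    List (List String) × List String × Int :=
  let w : Int := (PySem.Dict.getD (PySem.Dict.mk groups) p.1 []).length  -- group_weight = len(groups[group_name])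
  let s := st.2.2 + w                                                   -- group_size += group_weight
  if s > 20 then (st.1 ++ [st.2.1], ([p.1], (0 : Int)))                 -- new bucket; append name to it
  else (st.1, (st.2.1 ++ [p.1], s))

-- Phase 2 of A: one bucket → key first-last, insert [], then append item by item.
-- group_names[0] / group_names[len-1] raise IndexError on an empty bucket:
-- Pre_ guarantees every bucket is nonempty, so headD/getLastD defaults are unreachable.
def emitBucketA (groups : List (String × List String))
    (ng : PySem.Dict String (List String)) (names : List String) :
    PySem.Dict String (List String) :=
  let key := names.headD "" ++ "-" ++ names.getLastD ""
  let ng1 := ng.insert key []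
  names.foldl (fun d n =>
    (PySem.Dict.getD (PySem.Dict.mk groups) n []).foldl
      (fun d item => d.modify key [] (fun v => v ++ [item])) d) ng1

def merge_small_groups (groups : List (String × List String)) : List (String × List String) :=
  let st := groups.foldl (mergeStepA groups) ([], ([], (0 : Int)))
  let classifier := st.1 ++ [st.2.1]
  (classifier.foldl (emitBucketA groups) PySem.Dict.empty).items

-- ===== PORT B =====
-- state = (new_groups, first, last, items, size); first = none before the first group.
def mergeStepB (groups : List (String × List String))
    (st : PySem.Dict String (List String) × Option String × String × List String × Int)
    (p : String × List String) :
    PySem.Dict String (List String) × Option String × String × List String × Int :=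
  let records := PySem.Dict.getD (PySem.Dict.mk groups) p.1 []
  match st with
  | (ng, first, last, items, size) =>
    if first.isSome ∧ size + records.length > 20 then
      (ng.insert (first.getD "" ++ "-" ++ last) items, some p.1, p.1, records, 0)
    else
      (ng, some (first.getD p.1), p.1, items ++ records, size + records.length)

def merge_small_groups_alt (groups : List (String × List String)) : List (String × List String) :=
  let st := groups.foldl (mergeStepB groups) (PySem.Dict.empty, none, "", [], (0 : Int))
  ((st.1).insert ((st.2.1).getD "" ++ "-" ++ st.2.2.1) st.2.2.2.1).items

-- ===== PRECONDITION & SPEC =====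
-- Pre_ excludes exactly the inputs where A raises IndexError: an empty dict, or a
-- first group alone heavier than 20 records (then classifier[0] stays empty and
-- group_names[0] raises).
def Pre_merge_small_groups (groups : List (String × List String)) : Prop :=
  groups ≠ [] ∧ (groups.headD ("", [])).2.length ≤ 20
instance (groups : List (String × List String)) : Decidable (Pre_merge_small_groups groups) := by
  unfold Pre_merge_small_groups; infer_instance

def pvWitness_merge_small_groups : (List (String × List String)) := [("A", ["x"])]

def Spec_merge_small_groups (groups : List (String × List String)) (out : List (String × List String)) : Prop := out = merge_small_groups_alt groups
instance (groups : List (String × List String)) (out : List (String × List String)) : Decidable (Spec_merge_small_groups groups out) := by unfold Spec_merge_small_groups; infer_instance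

-- ===== CLAIM (what is proved, stated in full; the proofs are below) =====
def Claim_equal_merge_small_groups : Prop := ∀ (groups : List (String × List String)), Dom_merge_small_groups groups → Pre_merge_small_groups groups → Spec_merge_small_groups groups (merge_small_groups groups)

-- ===== LEMMAS AND PROOFS =====

theorem lastD_cons_concat (f p : String) (mid : List String) :
    ((f :: (mid ++ [p])).getLastD "") = p := by
  rw [List.getLastD_eq_getLast?,
    show f :: (mid ++ [p]) = (f :: mid) ++ [p] by simp, List.getLast?_concat]
  rfl

-- Appending items one by one under a key just inserted is one insert of the list.
theorem foldl_modify_append_insert {d : PySem.Dict String (List String)}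
    (L : List String) (k : String) (v : List String) :
    L.foldl (fun d item => d.modify k [] (fun w => w ++ [item])) (d.insert k v)
      = d.insert k (v ++ L) := by
  induction L generalizing v with
  | nil => simp
  | cons x xs ih =>
      have h : (d.insert k v).modify k [] (fun w => w ++ [x]) = d.insert k (v ++ [x]) := by
        simp [PySem.Dict.modify, PySem.Dict.getD_insert_self, PySem.Dict.insert_insert_self]
      simp only [List.foldl_cons, h, ih]
      simp

-- A's bucket emission is a single insert of the flattened records.
theorem emitBucketA_eq (groups : List (String × List String))
    (ng : PySem.Dict String (List String)) (names : List String) :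
    emitBucketA groups ng names
      = ng.insert (names.headD "" ++ "-" ++ names.getLastD "")
          (names.flatMap (fun n => PySem.Dict.getD (PySem.Dict.mk groups) n [])) := by
  unfold emitBucketA
  simp only []
  -- generalize the accumulated value
  suffices h : ∀ (v : List String),
      names.foldl (fun d n =>
        (PySem.Dict.getD (PySem.Dict.mk groups) n []).foldl
          (fun d item => d.modify (names.headD "" ++ "-" ++ names.getLastD "") [] (fun w => w ++ [item])) d)
        (ng.insert (names.headD "" ++ "-" ++ names.getLastD "") v)
      = ng.insert (names.headD "" ++ "-" ++ names.getLastD "")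
          (v ++ names.flatMap (fun n => PySem.Dict.getD (PySem.Dict.mk groups) n [])) by
    simpa using h []
  generalize (names.headD "" ++ "-" ++ names.getLastD "") = key
  induction names with
  | nil => simp
  | cons n ns ih =>
      intro v
      simp only [List.foldl_cons, foldl_modify_append_insert, List.flatMap_cons]
      rw [ih]
      simp
  -- note: the key mentions `names` but is generalized before the induction

-- Main invariant: with a nonempty current bucket f :: mid, B's fused state tracks
-- A's (finished, current, size) state, and finishing agrees.
theorem main_inv (groups : List (String × List String)) (rest : List (String × List String))
    (fin : List (List String)) (f : String) (mid : List String) (sz : Int) :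
    (let st := rest.foldl (mergeStepB groups)
        (fin.foldl (emitBucketA groups) PySem.Dict.empty, some f,
         (f :: mid).getLastD "",
         (f :: mid).flatMap (fun n => PySem.Dict.getD (PySem.Dict.mk groups) n []), sz)
     ((st.1).insert ((st.2.1).getD "" ++ "-" ++ st.2.2.1) st.2.2.2.1).items)
    = (let st := rest.foldl (mergeStepA groups) (fin, (f :: mid, sz))
       ((st.1 ++ [st.2.1]).foldl (emitBucketA groups) PySem.Dict.empty).items) := by
  induction rest generalizing fin f mid sz with
  | nil =>
      simp only [List.foldl_nil, List.foldl_append, List.foldl_cons]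
      rw [emitBucketA_eq]
      simp
  | cons p ps ih =>
      simp only [List.foldl_cons]
      by_cases h : sz + ((PySem.Dict.getD (PySem.Dict.mk groups) p.1 []).length : Int) > 20
      · have hA : mergeStepA groups (fin, (f :: mid, sz)) p
            = (fin ++ [f :: mid], ([p.1], (0 : Int))) := by
          simp [mergeStepA, h]
        have hB : mergeStepB groups
            (fin.foldl (emitBucketA groups) PySem.Dict.empty, some f,
             (f :: mid).getLastD "",
             (f :: mid).flatMap (fun n => PySem.Dict.getD (PySem.Dict.mk groups) n []), sz) p
            = ((fin.foldl (emitBucketA groups) PySem.Dict.empty).insert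
                 (f ++ "-" ++ (f :: mid).getLastD "")
                 ((f :: mid).flatMap (fun n => PySem.Dict.getD (PySem.Dict.mk groups) n [])),
               some p.1, p.1, PySem.Dict.getD (PySem.Dict.mk groups) p.1 [], 0) := by
          simp [mergeStepB, h]
        rw [hA, hB]
        have := ih (fin ++ [f :: mid]) p.1 [] 0
        simp only [List.getLastD_eq_getLast?, List.getLast?_singleton,
          Option.getD_some, List.flatMap_cons, List.flatMap_nil, List.append_nil] at this
        rw [← this]
        simp only [List.foldl_append, List.foldl_cons, List.foldl_nil]
        rw [emitBucketA_eq]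
        simp
      · have hA : mergeStepA groups (fin, (f :: mid, sz)) p
            = (fin, (f :: mid ++ [p.1], sz + ((PySem.Dict.getD (PySem.Dict.mk groups) p.1 []).length : Int))) := by
          simp [mergeStepA, h]
        have hB : mergeStepB groups
            (fin.foldl (emitBucketA groups) PySem.Dict.empty, some f,
             (f :: mid).getLastD "",
             (f :: mid).flatMap (fun n => PySem.Dict.getD (PySem.Dict.mk groups) n []), sz) p
            = (fin.foldl (emitBucketA groups) PySem.Dict.empty, some f, p.1,
               ((f :: mid).flatMap (fun n => PySem.Dict.getD (PySem.Dict.mk groups) n []))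
                 ++ PySem.Dict.getD (PySem.Dict.mk groups) p.1 [],
               sz + ((PySem.Dict.getD (PySem.Dict.mk groups) p.1 []).length : Int)) := by
          simp [mergeStepB, h]
        rw [hA, hB]
        have := ih fin f (mid ++ [p.1])
          (sz + ((PySem.Dict.getD (PySem.Dict.mk groups) p.1 []).length : Int))
        simp only [List.cons_append, lastD_cons_concat, List.flatMap_append,
          List.flatMap_cons, List.flatMap_nil, List.append_nil] at this ⊢
        rw [← this]
        simp

-- ===== VERDICT (by name: the statement is the Claim_ definition above) =====
theorem merge_small_groups_spec : Claim_equal_merge_small_groups := by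
  intro groups _ hpre
  obtain ⟨hne, hw⟩ := hpre
  unfold Spec_merge_small_groups
  cases groups with
  | nil => exact absurd rfl hne
  | cons p ps =>
      unfold merge_small_groups merge_small_groups_alt
      simp only [List.foldl_cons]
      have hlook : PySem.Dict.getD (PySem.Dict.mk (p :: ps)) p.1 [] = p.2 := by
        simp [PySem.Dict.getD, PySem.Dict.get?]
      have hwA : mergeStepA (p :: ps) ([], ([], (0 : Int))) p = ([], ([p.1], (p.2.length : Int))) := by
        simp only [List.headD_cons] at hw
        simp [mergeStepA, hlook]
        omega
      have hwB : mergeStepB (p :: ps) (PySem.Dict.empty, none, "", [], (0 : Int)) p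
          = (PySem.Dict.empty, some p.1, p.1, p.2, (p.2.length : Int)) := by
        simp [mergeStepB, hlook]
      rw [hwA, hwB]
      have := main_inv (p :: ps) ps [] p.1 [] (p.2.length : Int)
      simp only [List.foldl_nil, List.getLastD_eq_getLast?, List.getLast?_singleton,
        Option.getD_some, List.flatMap_cons,
        List.flatMap_nil, List.append_nil, hlook] at this
      exact this.symm
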